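-- pv_equiv track=rewrite | github.com/seangeleno/algChallenges | STL_OOP_adventures/GCD.py | generalizedGCD
-- ===== SOURCE A (Python) =====
-- def generalizedGCD(num, arr):
--     GCD = 1
--     for i in range(num):
--         if arr[i] % GCD == 0:
--             candidate = arr[i]
--             flag = 0
--             for j in range(num):
--                 if arr[j] % candidate != 0:
--                     flag = 1
--             if arr[i] > GCD and flag == 0:
--                 GCD = candidate
--     return GCD
-- ===== SOURCE B (Python) =====
-- def generalizedGCD(num, arr):
--     # one pass to compute the gcd of the prefix, one pass to pick the largest
--     # element > 1 that divides that gcd (equivalently: divides every element)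
--     g = 0
--     for i in range(num):
--         a, b = g, abs(arr[i])
--         while b:
--             a, b = b, a % b
--         g = a
--     best = 1
--     for i in range(num):
--         x = arr[i]
--         if x > best and g % x == 0:
--             best = x
--     return best
-- ===== Notes on version B (the rewrite author's own statement) =====
-- stated objective: faster
-- what changed: Instead of re-scanning the whole array for every candidate element (nested loops), B computes the gcd of the prefix in one pass with Euclid's algorithm and then in a second pass takes the largest element > 1 that divides that gcd, which is exactly the largest element dividing all elements.
import Mathlib
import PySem

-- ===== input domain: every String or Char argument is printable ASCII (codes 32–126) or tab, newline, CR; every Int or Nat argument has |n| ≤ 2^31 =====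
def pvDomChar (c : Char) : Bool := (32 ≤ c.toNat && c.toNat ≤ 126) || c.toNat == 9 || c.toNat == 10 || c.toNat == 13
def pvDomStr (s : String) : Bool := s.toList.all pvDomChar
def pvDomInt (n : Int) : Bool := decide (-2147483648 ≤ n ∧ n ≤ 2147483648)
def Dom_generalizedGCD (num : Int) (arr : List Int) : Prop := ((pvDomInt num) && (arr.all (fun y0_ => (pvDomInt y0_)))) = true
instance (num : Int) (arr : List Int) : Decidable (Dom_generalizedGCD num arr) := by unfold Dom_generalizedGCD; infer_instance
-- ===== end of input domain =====

-- B replaces A's nested candidate-times-array scan by one Euclid-gcd pass plus one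
-- largest-dividing-element pass (objective: faster).

-- ===== PORT A =====
def generalizedGCD (num : Int) (arr : List Int) : Int :=
  (PySem.List.pyRange 0 num 1).foldl (fun GCD i =>
    if PySem.Int.mod (PySem.List.pyGetD arr i 0) GCD = 0 then
      let candidate := PySem.List.pyGetD arr i 0
      let flag : Int :=
        (PySem.List.pyRange 0 num 1).foldl (fun flag j =>
          if PySem.Int.mod (PySem.List.pyGetD arr j 0) candidate ≠ 0 then 1 else flag) 0
      if PySem.List.pyGetD arr i 0 > GCD ∧ flag = 0 then candidate else GCD
    else GCD) 1

-- ===== PORT B =====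
-- the hand-written Euclid loop of Source B: while b: a, b = b, a % b
def pvEuclid (a b : Int) : Int :=
  if _h : b = 0 then a
  else pvEuclid b (PySem.Int.mod a b)
termination_by b.natAbs
decreasing_by
  rcases lt_or_gt_of_ne _h with hb | hb
  · have h1 := (PySem.Int.mod_neg_bounds a hb).1
    have h2 := (PySem.Int.mod_neg_bounds a hb).2
    omega
  · have h1 := PySem.Int.mod_nonneg a hb
    have h2 := PySem.Int.mod_lt a hb
    omega

def generalizedGCD_alt (num : Int) (arr : List Int) : Int :=
  let g : Int :=
    (PySem.List.pyRange 0 num 1).foldl (fun g i =>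
      pvEuclid g |PySem.List.pyGetD arr i 0|) 0
  (PySem.List.pyRange 0 num 1).foldl (fun best i =>
    if PySem.List.pyGetD arr i 0 > best ∧ PySem.Int.mod g (PySem.List.pyGetD arr i 0) = 0 then
      PySem.List.pyGetD arr i 0
    else best) 1

-- ===== PRECONDITION & SPEC =====
-- Pre_ excludes exactly the inputs on which the Python A raises: num beyond the
-- array length (IndexError) and a zero among the first num elements (ZeroDivisionError).
def Pre_generalizedGCD (num : Int) (arr : List Int) : Prop :=
  num ≤ (arr.length : Int) ∧ ∀ x ∈ arr.take num.toNat, x ≠ 0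
instance (num : Int) (arr : List Int) : Decidable (Pre_generalizedGCD num arr) := by
  unfold Pre_generalizedGCD; infer_instance
def pvWitness_generalizedGCD : Int × List Int := (3, [12, 6, 18])

def Spec_generalizedGCD (num : Int) (arr : List Int) (out : Int) : Prop := out = generalizedGCD_alt num arr
instance (num : Int) (arr : List Int) (out : Int) : Decidable (Spec_generalizedGCD num arr out) := by unfold Spec_generalizedGCD; infer_instance

-- ===== CLAIM (what is proved, stated in full; the proofs are below) =====
def Claim_equal_generalizedGCD : Prop := ∀ (num : Int) (arr : List Int), Dom_generalizedGCD num arr → Pre_generalizedGCD num arr → Spec_generalizedGCD num arr (generalizedGCD num arr)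

-- ===== LEMMAS AND PROOFS =====

-- fold over range(n) indexing xs = fold over the prefix of xs
theorem pvFoldl_range_getD {α β : Type} (f : β → α → β) (xs : List α) (d : α) :
    ∀ (n : Nat), n ≤ xs.length → ∀ (init : β),
      (List.range n).foldl (fun acc k => f acc (xs.getD k d)) init = (xs.take n).foldl f init := by
  intro n
  induction n with
  | zero => intro _ init; simp
  | succ m ih =>
    intro hn init
    rw [List.range_succ, List.foldl_append, ih (by omega),
      List.take_add_one, List.foldl_append]
    simp [List.getD, List.getElem?_eq_getElem (by omega : m < xs.length)]

-- fold over range(num) reading arr[i] = fold over arr.take num.toNat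
theorem pvFoldl_pyRange (num : Int) (arr : List Int) (h : num ≤ (arr.length : Int))
    {β : Type} (f : β → Int → β) (init : β) :
    (PySem.List.pyRange 0 num 1).foldl (fun acc i => f acc (PySem.List.pyGetD arr i 0)) init
      = (arr.take num.toNat).foldl f init := by
  rw [PySem.List.pyRange_one, List.foldl_map]
  have step : (List.range (num - 0).toNat).foldl
        (fun acc (k : Nat) => f acc (PySem.List.pyGetD arr ((0:Int) + k) 0)) init
      = (List.range (num - 0).toNat).foldl (fun acc (k : Nat) => f acc (arr.getD k 0)) init := by
    apply PySem.List.foldl_congr_mem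
    intro acc k _
    simp
  rw [step]
  have hn : (num - 0).toNat = num.toNat := by omega
  rw [hn]
  exact pvFoldl_range_getD f arr 0 num.toNat (by omega) init

-- the flag loop sets 1 exactly when some element triggers it
theorem pvFlag_eq (p : Int → Prop) [DecidablePred p] (l : List Int) :
    ∀ (c : Int), (l.foldl (fun f y => if p y then 1 else f) c)
      = if l.any (fun y => decide (p y)) then 1 else c := by
  induction l with
  | nil => intro c; simp
  | cons x l ih =>
    intro c
    simp only [List.foldl_cons, List.any_cons, ih]
    by_cases hx : p x
    · by_cases hl : (l.any fun y => decide (p y)) = true <;> simp [hx, hl]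
    · by_cases hl : (l.any fun y => decide (p y)) = true <;> simp [hx, hl]

-- the common specification step: take x when it beats the accumulator and divides all of L
def pvStep (L : List Int) (b x : Int) : Int :=
  if b < x ∧ ∀ y ∈ L, x ∣ y then x else b

-- A's loop equals the specification fold, under the invariant that the running
-- GCD is ≥ 1 and divides every element of L
theorem pvA_loop (L : List Int) (m : List Int) (hm : ∀ x ∈ m, x ∈ L) :
    ∀ (b : Int), 1 ≤ b → (∀ y ∈ L, b ∣ y) →
    m.foldl (fun GCD ai =>
      if PySem.Int.mod ai GCD = 0 then
        if ai > GCD ∧ (if L.any (fun y => decide (¬ PySem.Int.mod y ai = 0)) then (1:Int) else 0) = 0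
        then ai else GCD
      else GCD) b
    = m.foldl (pvStep L) b := by
  induction m with
  | nil => intro b _ _; rfl
  | cons x m ih =>
    intro b hb1 hbdvd
    have hxL : x ∈ L := hm x (List.mem_cons_self)
    have hm' : ∀ z ∈ m, z ∈ L := fun z hz => hm z (List.mem_cons_of_mem x hz)
    have hflag : (if L.any (fun y => decide (¬ PySem.Int.mod y x = 0)) then (1:Int) else 0) = 0
        ↔ ∀ y ∈ L, x ∣ y := by
      cases hA : L.any (fun y => decide (¬ PySem.Int.mod y x = 0)) with
      | true =>
        obtain ⟨y, hy, hpy⟩ := List.any_eq_true.mp hA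
        simp only [if_true]
        constructor
        · intro h; exact absurd h one_ne_zero
        · intro h
          exact absurd ((PySem.Int.mod_eq_zero_iff_dvd y x).mpr (h y hy)) (of_decide_eq_true hpy)
      | false =>
        simp only [Bool.false_eq_true, if_false]
        constructor
        · intro _ y hy
          have := List.any_eq_false.mp hA y hy
          simp only [decide_not, Bool.not_eq_true', decide_eq_false_iff_not, not_not] at this
          exact (PySem.Int.mod_eq_zero_iff_dvd y x).mp (by simpa using this)
        · intro _; trivial
    simp only [List.foldl_cons]
    by_cases hc : b < x ∧ ∀ y ∈ L, x ∣ y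
    · have hbx : b ∣ x := hbdvd x hxL
      have hstepA :
          (if PySem.Int.mod x b = 0 then
            if x > b ∧ (if L.any (fun y => decide (¬ PySem.Int.mod y x = 0)) then (1:Int) else 0) = 0
            then x else b
          else b) = x := by
        rw [if_pos ((PySem.Int.mod_eq_zero_iff_dvd x b).mpr hbx)]
        exact if_pos ⟨hc.1, hflag.mpr hc.2⟩
      rw [hstepA, pvStep, if_pos hc]
      exact ih hm' x (by omega) hc.2
    · have hstepA :
          (if PySem.Int.mod x b = 0 then
            if x > b ∧ (if L.any (fun y => decide (¬ PySem.Int.mod y x = 0)) then (1:Int) else 0) = 0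
            then x else b
          else b) = b := by
        by_cases hbx : PySem.Int.mod x b = 0
        · rw [if_pos hbx]
          apply if_neg
          intro h
          exact hc ⟨h.1, hflag.mp h.2⟩
        · exact if_neg hbx
      rw [hstepA, pvStep, if_neg hc]
      exact ih hm' b hb1 hbdvd

-- Euclid's loop on nonnegative inputs: nonnegative, and divisors of the result
-- are exactly the common divisors
theorem pvEuclid_spec : ∀ (n : Nat) (a b : Int), b.natAbs ≤ n → 0 ≤ a → 0 ≤ b →
    0 ≤ pvEuclid a b ∧ ∀ x : Int, (x ∣ pvEuclid a b ↔ x ∣ a ∧ x ∣ b) := by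
  intro n
  induction n with
  | zero =>
    intro a b hb ha hb0
    have h0 : b = 0 := by omega
    subst h0
    rw [pvEuclid]
    exact ⟨ha, fun x => by simp⟩
  | succ n ih =>
    intro a b hb ha hb0
    by_cases h0 : b = 0
    · subst h0
      rw [pvEuclid]
      exact ⟨ha, fun x => by simp⟩
    · have hbpos : 0 < b := by omega
      rw [pvEuclid, dif_neg h0]
      have hmod : PySem.Int.mod a b = a % b := PySem.Int.mod_eq_emod_of_pos hbpos
      have h1 : 0 ≤ a % b := Int.emod_nonneg a h0
      have h2 : a % b < b := Int.emod_lt_of_pos a hbpos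
      have hrec := ih b (a % b) (by rw [hmod] at *; omega) hb0 (by omega)
      rw [hmod]
      refine ⟨hrec.1, fun x => (hrec.2 x).trans ?_⟩
      have hdef : a % b = a - b * (a / b) := Int.emod_def a b
      constructor
      · rintro ⟨hxb, hxr⟩
        refine ⟨?_, hxb⟩
        have : a = a % b + b * (a / b) := by omega
        rw [this]
        exact dvd_add hxr (Dvd.dvd.mul_right hxb _)
      · rintro ⟨hxa, hxb⟩
        refine ⟨hxb, ?_⟩
        rw [hdef]
        exact dvd_sub hxa (Dvd.dvd.mul_right hxb _)

-- the running gcd of a list: divisors of the fold are the common divisors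
theorem pvG_spec (l : List Int) :
    ∀ (init : Int), 0 ≤ init →
      0 ≤ l.foldl (fun g y => pvEuclid g |y|) init ∧
      ∀ x : Int, (x ∣ l.foldl (fun g y => pvEuclid g |y|) init ↔ x ∣ init ∧ ∀ y ∈ l, x ∣ y) := by
  induction l with
  | nil => intro init h; exact ⟨h, fun x => by simp⟩
  | cons z l ih =>
    intro init hinit
    simp only [List.foldl_cons]
    have hz := pvEuclid_spec (|z|).natAbs init |z| le_rfl hinit (abs_nonneg z)
    have hrec := ih (pvEuclid init |z|) hz.1
    refine ⟨hrec.1, fun x => (hrec.2 x).trans ?_⟩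
    rw [hz.2 x]
    constructor
    · rintro ⟨⟨hxi, hxz⟩, hxl⟩
      exact ⟨hxi, fun y hy => by
        rcases List.mem_cons.mp hy with h | h
        · subst h; exact (dvd_abs x y).mp hxz
        · exact hxl y h⟩
    · rintro ⟨hxi, hxl⟩
      exact ⟨⟨hxi, (dvd_abs x z).mpr (hxl z List.mem_cons_self)⟩,
        fun y hy => hxl y (List.mem_cons_of_mem z hy)⟩

-- ===== VERDICT (by name: the statement is the Claim_ definition above) =====
theorem generalizedGCD_spec : Claim_equal_generalizedGCD := by
  intro num arr _ hpre
  obtain ⟨h1, _⟩ := hpre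
  unfold Spec_generalizedGCD
  set l := arr.take num.toNat with hl
  -- A's outer fold over the prefix
  have hA : generalizedGCD num arr =
      l.foldl (fun GCD ai =>
        if PySem.Int.mod ai GCD = 0 then
          if ai > GCD ∧
              ((PySem.List.pyRange 0 num 1).foldl (fun flag j =>
                if PySem.Int.mod (PySem.List.pyGetD arr j 0) ai ≠ 0 then (1:Int) else flag) 0) = 0
          then ai else GCD
        else GCD) 1 :=
    pvFoldl_pyRange num arr h1
      (fun GCD ai =>
        if PySem.Int.mod ai GCD = 0 then
          if ai > GCD ∧
              ((PySem.List.pyRange 0 num 1).foldl (fun flag j =>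
                if PySem.Int.mod (PySem.List.pyGetD arr j 0) ai ≠ 0 then (1:Int) else flag) 0) = 0
          then ai else GCD
        else GCD) 1
  -- the inner flag loop, per candidate
  have hinner : ∀ ai : Int,
      ((PySem.List.pyRange 0 num 1).foldl (fun flag j =>
        if PySem.Int.mod (PySem.List.pyGetD arr j 0) ai ≠ 0 then (1:Int) else flag) 0)
      = if l.any (fun y => decide (¬ PySem.Int.mod y ai = 0)) then (1:Int) else 0 := by
    intro ai
    exact (pvFoldl_pyRange num arr h1
      (fun flag y => if PySem.Int.mod y ai ≠ 0 then 1 else flag) 0).trans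
      (pvFlag_eq (fun y => ¬ PySem.Int.mod y ai = 0) l 0)
  simp only [hinner] at hA
  rw [hA, pvA_loop l l (fun x hx => hx) 1 le_rfl (fun y _ => one_dvd y)]
  -- B's two folds over the prefix
  show l.foldl (pvStep l) 1 = generalizedGCD_alt num arr
  unfold generalizedGCD_alt
  rw [pvFoldl_pyRange num arr h1 (fun g y => pvEuclid g |y|) 0]
  set g := l.foldl (fun g y => pvEuclid g |y|) 0 with hg
  rw [pvFoldl_pyRange num arr h1
    (fun best y => if y > best ∧ PySem.Int.mod g y = 0 then y else best) 1]
  apply Eq.symm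
  apply PySem.List.foldl_congr_mem
  intro b x hx
  have hdvd : (PySem.Int.mod g x = 0) ↔ ∀ y ∈ l, x ∣ y := by
    rw [PySem.Int.mod_eq_zero_iff_dvd, (pvG_spec l 0 le_rfl).2 x]
    simp
  exact if_congr (and_congr Iff.rfl hdvd) rfl rfl
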